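-- pv_equiv track=rewrite | github.com/benquick123/code-profiling | code/batch-1/vse-naloge-brez-testov/DN6-M-188.py | prestej_tvite
-- ===== SOURCE A (Python) =====
-- import collections
--
-- def avtor(tvit):
--     tvit = tvit.split(":")
--     return tvit[0]
--
-- def prestej_tvite(tviti):
--     s = {}
--     avtorji = []
--     for i in tviti:
--         avtorji += [avtor(i)]
--     c = collections.Counter(avtorji)
--     for j in tviti:
--         if avtor(j) not in s:
--             s[avtor(j)] = c[avtor(j)]
--     return s
-- ===== SOURCE B (Python) =====
-- def avtor(tvit):
--     return tvit.split(":")[0]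
--
-- def prestej_tvite(tviti):
--     s = {}
--     for t in tviti:
--         a = avtor(t)
--         s[a] = s.get(a, 0) + 1
--     return s
-- ===== Notes on version B (the rewrite author's own statement) =====
-- stated objective: simpler
-- what changed: Replaces A's three phases (build an author list, build a Counter over it, then a second guarded pass copying counts at first occurrences) with a single accumulation loop s[a] = s.get(a, 0) + 1 over the tweets.
import Mathlib
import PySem

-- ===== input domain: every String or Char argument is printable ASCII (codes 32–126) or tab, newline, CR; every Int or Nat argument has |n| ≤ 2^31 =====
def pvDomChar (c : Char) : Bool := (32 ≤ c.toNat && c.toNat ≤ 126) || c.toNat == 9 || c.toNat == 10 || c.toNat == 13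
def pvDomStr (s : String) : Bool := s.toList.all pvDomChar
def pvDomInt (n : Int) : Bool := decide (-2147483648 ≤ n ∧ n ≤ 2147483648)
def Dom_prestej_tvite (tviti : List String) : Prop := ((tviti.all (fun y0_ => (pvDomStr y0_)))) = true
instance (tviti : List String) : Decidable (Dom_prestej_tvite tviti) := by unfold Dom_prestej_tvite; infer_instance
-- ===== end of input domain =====

-- B replaces A's three phases (author list, Counter, guarded second pass) with one
-- accumulation loop over the tweets; same result, proved equal on Dom (simpler, not faster).


-- ===== PORT A =====
-- avtor(tvit) = tvit.split(":")[0]; split(":") is never empty, so the pyGetD default is never used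
def pvAvtor (tvit : String) : String :=
  PySem.List.pyGetD ((PySem.Str.split? tvit ":").getD []) 0 ""

def prestej_tvite (tviti : List String) : List (String × Int) :=
  let avtorji := tviti.foldl (fun acc i => acc ++ [pvAvtor i]) []
  let c := PySem.Dict.counter avtorji
  let s := tviti.foldl
    (fun s j => if s.contains (pvAvtor j) then s else s.insert (pvAvtor j) (c.getD (pvAvtor j) 0))
    PySem.Dict.empty
  s.items

-- ===== PORT B =====
def prestej_tvite_alt (tviti : List String) : List (String × Int) :=
  (tviti.foldl
    (fun s t => let a := pvAvtor t; s.insert a (s.getD a 0 + 1))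
    PySem.Dict.empty).items

-- ===== PRECONDITION & SPEC =====
def Spec_prestej_tvite (tviti : List String) (out : List (String × Int)) : Prop := out = prestej_tvite_alt tviti
instance (tviti : List String) (out : List (String × Int)) : Decidable (Spec_prestej_tvite tviti out) := by unfold Spec_prestej_tvite; infer_instance

-- ===== CLAIM (what is proved, stated in full; the proofs are below) =====
def Claim_equal_prestej_tvite : Prop := ∀ (tviti : List String), Dom_prestej_tvite tviti → Spec_prestej_tvite tviti (prestej_tvite tviti)

-- ===== LEMMAS AND PROOFS =====

-- A's guarded second pass (insert-at-first-occurrence with value f a) produces exactly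
-- the first-occurrence set paired with f.
theorem pvLoop_items (ys : List String) (f : String → Int) :
    (ys.foldl (fun s a => if s.contains a then s else s.insert a (f a)) PySem.Dict.empty).items
      = (PySem.Set.ofList ys).map (fun a => (a, f a)) := by
  induction ys using List.reverseRecOn with
  | nil => rfl
  | append_singleton ys x ih =>
    rw [List.foldl_append, List.foldl_cons, List.foldl_nil, PySem.Set.ofList_append_singleton]
    set d := ys.foldl (fun s a => if s.contains a then s else s.insert a (f a)) PySem.Dict.empty with hd
    have hkeys : d.keys = ((PySem.Set.ofList ys).map (fun a => (a, f a))).map Prod.fst := by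
      simp only [PySem.Dict.keys, ih]
    have hcont : d.contains x = decide (x ∈ ys) := by
      rw [PySem.Dict.contains_eq_decide_mem_keys, hkeys]
      simp [PySem.Set.mem_ofList]
    by_cases hx : x ∈ ys
    · rw [hcont]
      simp [hx, ih]
    · have hc : d.contains x = false := by simp [hcont, hx]
      rw [hcont]
      simp only [hx, decide_false, Bool.false_eq_true, if_false]
      rw [PySem.Dict.items_insert_of_not_contains d (f x) hc, ih,
        PySem.Set.add_of_not_mem (by simpa [PySem.Set.mem_ofList] using hx)]
      simp

-- ===== VERDICT (by name: the statement is the Claim_ definition above) =====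
theorem prestej_tvite_spec : Claim_equal_prestej_tvite := by
  intro tviti _
  unfold Spec_prestej_tvite prestej_tvite prestej_tvite_alt
  set ys := tviti.map pvAvtor with hys
  have havt : tviti.foldl (fun acc i => acc ++ [pvAvtor i]) [] = ys := by
    simpa using PySem.List.foldl_append_singleton_eq_map pvAvtor tviti []
  -- B side: the accumulation loop is Counter(ys)
  have hB : tviti.foldl (fun s t => let a := pvAvtor t; s.insert a (s.getD a 0 + 1))
      PySem.Dict.empty = PySem.Dict.counter ys := by
    rw [hys, ← PySem.Dict.foldl_insert_getD_add_one_eq_counter, List.foldl_map]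
  -- A side: rewrite the loop to a fold over ys and apply pvLoop_items
  have hA : tviti.foldl
      (fun s j => if s.contains (pvAvtor j) then s
        else s.insert (pvAvtor j) ((PySem.Dict.counter ys).getD (pvAvtor j) 0))
      PySem.Dict.empty
      = ys.foldl
        (fun s a => if s.contains a then s else s.insert a ((PySem.Dict.counter ys).getD a 0))
        PySem.Dict.empty := by
    rw [hys, List.foldl_map]
  simp only [havt, hB, hA, pvLoop_items, PySem.Dict.items_counter]
  exact List.map_congr_left (fun a _ => by rw [PySem.Dict.getD_counter])
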